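-- pv_equiv track=rewrite | github.com/Dooces/NUPCA4 | nupca3/memory/library.py | _build_blocks
-- ===== SOURCE A (Python) =====
-- from typing import Dict, Iterable, List, Optional, Sequence, Set, Tuple
--
-- def _build_blocks(state_dim: int, n_blocks: int) -> List[List[int]]:
--     """Build a DoF-aligned block partition with remainder distribution."""
--     D = int(state_dim)
--     B = max(1, int(n_blocks))
--     if D <= 0:
--         return [[]]
--     base = D // B
--     rem = D % B
--     if B > D:
--         B = D
--         base = 1
--         rem = 0
--     blocks: List[List[int]] = []
--     start = 0
--     for b in range(B):
--         size = base + (1 if b < rem else 0)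
--         end = start + size
--         blocks.append(list(range(start, end)))
--         start = end
--     return blocks
-- ===== SOURCE B (Python) =====
-- def _build_blocks(state_dim, n_blocks):
--     """Back-to-front greedy: repeatedly peel the LAST block as floor(remaining/k)."""
--     D = int(state_dim)
--     if D <= 0:
--         return [[]]
--     K = min(max(1, int(n_blocks)), D)
--     out = []
--     hi = D
--     for k in range(K, 0, -1):
--         size = hi // k
--         out.append(list(range(hi - size, hi)))
--         hi -= size
--     return out[::-1]
-- ===== Notes on version B (the rewrite author's own statement) =====
-- stated objective: alternative
-- what changed: B never computes base/rem: it builds the partition back-to-front by repeatedly peeling the LAST block as floor(remaining/k) from the top index, then reverses, instead of A's forward loop with precomputed divmod and a remainder test per block.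
import Mathlib
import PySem

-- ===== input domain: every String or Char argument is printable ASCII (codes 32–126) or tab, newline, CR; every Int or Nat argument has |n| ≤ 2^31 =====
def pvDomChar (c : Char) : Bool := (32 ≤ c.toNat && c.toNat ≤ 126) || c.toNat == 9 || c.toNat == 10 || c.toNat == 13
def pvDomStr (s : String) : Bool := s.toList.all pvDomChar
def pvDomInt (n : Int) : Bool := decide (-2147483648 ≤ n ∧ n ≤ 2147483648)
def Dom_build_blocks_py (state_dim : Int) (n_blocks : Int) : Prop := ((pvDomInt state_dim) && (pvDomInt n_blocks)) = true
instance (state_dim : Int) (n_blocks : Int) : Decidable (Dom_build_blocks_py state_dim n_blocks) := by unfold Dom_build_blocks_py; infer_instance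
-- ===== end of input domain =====

-- B builds the partition back-to-front, peeling the last block as floor(remaining/k) with no base/rem precomputation; objective: alternative algorithm, same cost.

-- ===== PORT A =====
def build_blocks_py (state_dim : Int) (n_blocks : Int) : List (List Int) :=
  let D := state_dim
  let B0 := max 1 n_blocks
  if D ≤ 0 then [[]]
  else
    let base0 := PySem.Int.floordiv D B0
    let rem0 := PySem.Int.mod D B0
    let B := if B0 > D then D else B0
    let base := if B0 > D then 1 else base0
    let rem := if B0 > D then 0 else rem0
    ((PySem.List.pyRange 0 B 1).foldl
      (fun (st : List (List Int) × Int) b =>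
        let size := base + (if b < rem then (1 : Int) else 0)
        let e := st.2 + size
        (st.1 ++ [PySem.List.pyRange st.2 e 1], e))
      ([], 0)).1

-- ===== PORT B =====
def build_blocks_py_alt (state_dim : Int) (n_blocks : Int) : List (List Int) :=
  let D := state_dim
  if D ≤ 0 then [[]]
  else
    let K := min (max 1 n_blocks) D
    (((PySem.List.pyRange K 0 (-1)).foldl
      (fun (st : List (List Int) × Int) k =>
        let size := PySem.Int.floordiv st.2 k
        (st.1 ++ [PySem.List.pyRange (st.2 - size) st.2 1], st.2 - size))
      ([], D)).1).reverse

-- ===== PRECONDITION & SPEC =====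
def Spec_build_blocks_py (state_dim : Int) (n_blocks : Int) (out : List (List Int)) : Prop := out = build_blocks_py_alt state_dim n_blocks
instance (state_dim : Int) (n_blocks : Int) (out : List (List Int)) : Decidable (Spec_build_blocks_py state_dim n_blocks out) := by unfold Spec_build_blocks_py; infer_instance

-- ===== CLAIM (what is proved, stated in full; the proofs are below) =====
def Claim_equal_build_blocks_py : Prop := ∀ (state_dim : Int) (n_blocks : Int), Dom_build_blocks_py state_dim n_blocks → Spec_build_blocks_py state_dim n_blocks (build_blocks_py state_dim n_blocks)

-- ===== LEMMAS AND PROOFS =====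

-- A's loop invariant: starting at index a with running start a*base + min a rem produces
-- the closed-form blocks for indices a..a+n-1.
theorem build_blocks_fold_eq (base rem : Int) :
    ∀ (n : ℕ) (a : Int) (acc : List (List Int)),
    ((PySem.List.pyRange a (a + n) 1).foldl
      (fun (st : List (List Int) × Int) b =>
        let size := base + (if b < rem then (1 : Int) else 0)
        let e := st.2 + size
        (st.1 ++ [PySem.List.pyRange st.2 e 1], e))
      (acc, a * base + min a rem)).1
    = acc ++ (PySem.List.pyRange a (a + n) 1).map (fun b =>
        PySem.List.pyRange (b * base + min b rem) ((b + 1) * base + min (b + 1) rem) 1) := by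
  intro n
  induction n with
  | zero =>
    intro a acc
    rw [PySem.List.pyRange_one_eq_nil (by omega)]
    simp
  | succ k ih =>
    intro a acc
    rw [PySem.List.pyRange_one_cons (by push_cast; omega)]
    simp only [List.foldl_cons, List.map_cons]
    have hend : a * base + min a rem + (base + (if a < rem then (1 : Int) else 0))
        = (a + 1) * base + min (a + 1) rem := by
      split_ifs with h
      · rw [min_eq_left (by omega), min_eq_left (by omega)]; ring
      · rw [min_eq_right (by omega), min_eq_right (by omega)]; ring
    have harg : a + (↑(k + 1) : Int) = (a + 1) + (↑k : Int) := by push_cast; omega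
    rw [hend, harg]
    rw [ih (a + 1) (acc ++ [PySem.List.pyRange (a * base + min a rem) ((a + 1) * base + min (a + 1) rem) 1])]
    simp

-- B's loop invariant: counting k down from K with top index K*base + min K rem peels
-- exactly the closed-form blocks, in reverse order.
theorem build_blocks_alt_fold_eq (base rem : Int) (hr : 0 ≤ rem) :
    ∀ (k : ℕ) (acc : List (List Int)),
    ((PySem.List.pyRange (k : Int) 0 (-1)).foldl
      (fun (st : List (List Int) × Int) j =>
        let size := PySem.Int.floordiv st.2 j
        (st.1 ++ [PySem.List.pyRange (st.2 - size) st.2 1], st.2 - size))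
      (acc, (k : Int) * base + min (k : Int) rem)).1
    = acc ++ ((PySem.List.pyRange 0 (k : Int) 1).map (fun b =>
        PySem.List.pyRange (b * base + min b rem) ((b + 1) * base + min (b + 1) rem) 1)).reverse := by
  intro k
  induction k with
  | zero =>
    intro acc
    rw [PySem.List.pyRange_neg_one_eq_nil (by omega), PySem.List.pyRange_one_eq_nil (by omega)]
    simp
  | succ m ih =>
    intro acc
    rw [PySem.List.pyRange_neg_one_cons (by push_cast; omega)]
    simp only [List.foldl_cons]
    set K : Int := ((m + 1 : ℕ) : Int) with hK
    have hKm : K = (m : Int) + 1 := by push_cast [hK]; ring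
    have hKpos : 0 < K := by omega
    have hsize : PySem.Int.floordiv (K * base + min K rem) K
        = base + (if (m : Int) < rem then (1 : Int) else 0) := by
      rw [PySem.Int.floordiv_eq_iff_of_pos hKpos]
      split_ifs with h
      · rw [min_eq_left (by omega)]
        constructor <;> nlinarith
      · rw [min_eq_right (by omega)]
        constructor <;> nlinarith
    have hnew : K * base + min K rem - (base + (if (m : Int) < rem then (1 : Int) else 0))
        = (m : Int) * base + min (m : Int) rem := by
      split_ifs with h
      · rw [min_eq_left (by omega), min_eq_left (by omega), hKm]; ring
      · rw [min_eq_right (by omega), min_eq_right (by omega), hKm]; ring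
    have hKm1 : K - 1 = (m : Int) := by omega
    rw [hsize, hnew, hKm1, ih]
    have hsplit : PySem.List.pyRange 0 K 1
        = PySem.List.pyRange 0 ((m : Int)) 1 ++ [(m : Int)] := by
      rw [hKm, PySem.List.pyRange_one_succ_right (by omega)]
    rw [hsplit]
    have hblk : PySem.List.pyRange ((m : Int) * base + min (m : Int) rem) (K * base + min K rem) 1
        = PySem.List.pyRange ((m : Int) * base + min (m : Int) rem)
            (((m : Int) + 1) * base + min ((m : Int) + 1) rem) 1 := by
      rw [hKm]
    rw [hblk]
    simp

-- ===== VERDICT (by name: the statement is the Claim_ definition above) =====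
theorem build_blocks_py_spec : Claim_equal_build_blocks_py := by
  intro D n _
  unfold Spec_build_blocks_py build_blocks_py build_blocks_py_alt
  simp only []
  by_cases hD : D ≤ 0
  · simp [hD]
  · simp only [if_neg hD]
    set B0 : Int := max 1 n with hB0
    have hB0pos : 0 < B0 := by simp [hB0]
    by_cases hBD : B0 > D
    · simp only [if_pos hBD]
      have hK : min B0 D = D := by omega
      have hA := build_blocks_fold_eq 1 0 D.toNat 0 []
      rw [show (0 : Int) * 1 + min (0 : Int) (0 : Int) = 0 by omega,
          show (0 : Int) + (D.toNat : Int) = D by omega] at hA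
      have hBside := build_blocks_alt_fold_eq 1 0 (by omega) D.toNat []
      rw [show (D.toNat : Int) * 1 + min (D.toNat : Int) (0 : Int) = D by omega,
          show ((D.toNat : Int)) = D by omega] at hBside
      rw [hK, hBside]
      simpa using hA
    · simp only [if_neg hBD]
      set base : Int := PySem.Int.floordiv D B0 with hbase
      set rem : Int := PySem.Int.mod D B0 with hrem
      have hdm : base * B0 + rem = D := PySem.Int.floordiv_mul_add_mod D B0
      have hr0 : 0 ≤ rem ∧ rem < B0 := by
        rw [hrem, PySem.Int.mod_eq_emod_of_pos hB0pos]
        exact ⟨Int.emod_nonneg D (by omega), Int.emod_lt_of_pos D hB0pos⟩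
      have hK : min B0 D = B0 := by omega
      have hA := build_blocks_fold_eq base rem B0.toNat 0 []
      rw [show (0 : Int) * base + min (0 : Int) rem = 0 by omega,
          show (0 : Int) + (B0.toNat : Int) = B0 by omega] at hA
      have hBside := build_blocks_alt_fold_eq base rem hr0.1 B0.toNat []
      rw [show (B0.toNat : Int) * base + min (B0.toNat : Int) rem = D by
            rw [show ((B0.toNat : Int)) = B0 by omega, min_eq_right (by omega)]; linarith,
          show ((B0.toNat : Int)) = B0 by omega] at hBside
      rw [hK, hBside]
      simpa using hA
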